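-- pv_equiv track=rewrite | github.com/mediangs/kappa4 | bin/shared/extract_intersect_points_from_model.py | _seed_index_having_neighbors
-- ===== SOURCE A (Python) =====
-- def _check_connectivity(e1, e2):
--     """
--     :param e1: [p1_intersect, p1_leaf1, p1_leaf2, p1_normal1, p1_normal2 ]
--     :param e2: [p1_intersect, p1_leaf1, p1_leaf2, p1_normal1, p1_normal2 ]
--     :return:
--     e1과 e2의 leaf에 같은 점이 존재하는지 체크
--     """
--     LEFT, RIGHT = 1, 2
--     return True if (e1[LEFT] in [e2[LEFT], e2[RIGHT]]) or (e1[RIGHT] in [e2[LEFT], e2[RIGHT]]) else False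
--
-- def _seed_index_having_neighbors(cp):
--     """
--     contour_points점을 하나씩 체크해서 연결점이 있는 인덱스를 반환
--     :param cp:
--     :return: contour_points의 인덱스
--     """
--     seed_index = 0
--     while seed_index < len(cp):
--         seed = cp.pop(seed_index)
--         cpis = [i for i, e2 in enumerate(cp) if _check_connectivity(seed, e2)]
--
--         if len(cpis) > 0:
--             return seed_index
--
--         cp.insert(seed_index, seed)
--         seed_index += 1
--     return -1
-- ===== SOURCE B (Python) =====
-- def _seed_index_having_neighbors(cp):
--     # Count, for every leaf point, how many elements hold it (each element once).
--     points = []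
--     for e in cp:
--         points.append(e[1])
--         if e[2] != e[1]:
--             points.append(e[2])
--     holders = {}
--     for p in points:
--         holders[p] = holders.get(p, 0) + 1
--     # An element has a connected partner iff one of its leaves is held by >= 2 elements.
--     for i, e in enumerate(cp):
--         if holders[e[1]] >= 2 or holders[e[2]] >= 2:
--             cp.pop(i)
--             return i
--     return -1
-- ===== Notes on version B (the rewrite author's own statement) =====
-- stated objective: alternative
-- what changed: Replaced A's pop-each-element-and-test-connectivity-against-every-other-element scan (quadratic in the worst case) by a hash-map pass that counts how many elements hold each leaf point, then a single scan returning the first element one of whose leaves is held by at least two elements; on typical inputs where A finds a neighbor early the measured cost is the same.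
-- outside the precondition, e.g. on _seed_index_having_neighbors([[0]]): A returns -1, B raises IndexError
import Mathlib
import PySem

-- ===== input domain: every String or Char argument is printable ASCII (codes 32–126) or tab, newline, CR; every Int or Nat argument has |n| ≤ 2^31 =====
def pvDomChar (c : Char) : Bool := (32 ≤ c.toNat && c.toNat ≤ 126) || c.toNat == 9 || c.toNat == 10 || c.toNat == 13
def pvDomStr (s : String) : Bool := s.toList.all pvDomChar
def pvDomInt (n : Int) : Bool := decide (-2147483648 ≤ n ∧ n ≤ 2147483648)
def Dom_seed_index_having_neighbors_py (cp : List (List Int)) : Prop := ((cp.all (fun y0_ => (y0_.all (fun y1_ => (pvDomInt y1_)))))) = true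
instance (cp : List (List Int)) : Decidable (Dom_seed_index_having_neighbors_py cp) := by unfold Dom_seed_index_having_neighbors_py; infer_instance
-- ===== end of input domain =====

-- B counts leaf-point holders in a dict and scans once, instead of A's pop-and-compare-against-
-- all-others scan (alternative algorithm, same measured cost); both pop the found element from cp
-- in place (the theorems below are about the return value; the mutation is identical).

-- ===== PORT A =====
-- _check_connectivity(e1, e2); the indexing e[1], e[2] is total here via pyGetD, exact under Pre_ (3 ≤ len e)
def pv_check_connectivity (e1 e2 : List Int) : Bool :=
  ([PySem.List.pyGetD e2 1 0, PySem.List.pyGetD e2 2 0].contains (PySem.List.pyGetD e1 1 0))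
  || ([PySem.List.pyGetD e2 1 0, PySem.List.pyGetD e2 2 0].contains (PySem.List.pyGetD e1 2 0))

-- the while loop of A; fuel = number of remaining iterations (cp.length at the top call suffices:
-- each non-returning iteration restores cp and increments seed_index)
def pvSeedLoopA (cp : List (List Int)) (seed_index : Nat) : Nat → Int
  | 0 => -1
  | fuel+1 =>
    if seed_index < cp.length then
      match PySem.List.pop? cp (seed_index : Int) with
      | none => -1
      | some (seed, rest) =>
        let cpis := (PySem.List.enumerate rest).filter (fun p => pv_check_connectivity seed p.2)
        if 0 < cpis.length then (seed_index : Int)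
        else pvSeedLoopA (PySem.List.insert rest (seed_index : Int) seed) (seed_index+1) fuel
    else -1

def seed_index_having_neighbors_py (cp : List (List Int)) : Int :=
  pvSeedLoopA cp 0 cp.length

-- ===== PORT B =====
-- the leaf points one element contributes to `points` (e[1], plus e[2] when different)
def pvLeaves (e : List Int) : List Int :=
  if PySem.List.pyGetD e 2 0 == PySem.List.pyGetD e 1 0 then [PySem.List.pyGetD e 1 0]
  else [PySem.List.pyGetD e 1 0, PySem.List.pyGetD e 2 0]

-- the final `for i, e in enumerate(cp)` scan of B
def pvFindLoop (holders : PySem.Dict Int Int) : List (List Int) → Nat → Int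
  | [], _ => -1
  | e :: rest, i =>
    if 2 ≤ holders.getD (PySem.List.pyGetD e 1 0) 0 ∨ 2 ≤ holders.getD (PySem.List.pyGetD e 2 0) 0
    then (i : Int) else pvFindLoop holders rest (i+1)

def seed_index_having_neighbors_py_alt (cp : List (List Int)) : Int :=
  let points := cp.foldl (fun acc e => acc ++ pvLeaves e) []
  let holders := points.foldl (fun d p => d.insert p (d.getD p 0 + 1)) PySem.Dict.empty
  pvFindLoop holders cp 0

-- ===== PRECONDITION & SPEC =====
-- Pre_ excludes inputs containing an element of length < 3: on those Python A raises IndexError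
-- whenever such an element takes part in a connectivity check; the few such inputs on which A
-- still returns (a singleton list, whose element is never compared) are excluded too, since B's
-- index accesses raise there (see claim.json "cites").
def Pre_seed_index_having_neighbors_py (cp : List (List Int)) : Prop :=
  ∀ e ∈ cp, 3 ≤ e.length
instance (cp : List (List Int)) : Decidable (Pre_seed_index_having_neighbors_py cp) := by
  unfold Pre_seed_index_having_neighbors_py; infer_instance

def pvWitness_seed_index_having_neighbors_py : List (List Int) := [[9, 1, 2], [8, 2, 5]]

def Spec_seed_index_having_neighbors_py (cp : List (List Int)) (out : Int) : Prop := out = seed_index_having_neighbors_py_alt cp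
instance (cp : List (List Int)) (out : Int) : Decidable (Spec_seed_index_having_neighbors_py cp out) := by unfold Spec_seed_index_having_neighbors_py; infer_instance

-- ===== CLAIM (what is proved, stated in full; the proofs are below) =====
def Claim_equal_seed_index_having_neighbors_py : Prop := ∀ (cp : List (List Int)), Dom_seed_index_having_neighbors_py cp → Pre_seed_index_having_neighbors_py cp → Spec_seed_index_having_neighbors_py cp (seed_index_having_neighbors_py cp)

-- ===== LEMMAS AND PROOFS =====

-- does element e hold leaf point p?
def pvHolds (e : List Int) (p : Int) : Bool :=
  PySem.List.pyGetD e 1 0 == p || PySem.List.pyGetD e 2 0 == p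

lemma pv_count_leaves (e : List Int) (p : Int) :
    (pvLeaves e).count p = if pvHolds e p then 1 else 0 := by
  simp only [pvLeaves, pvHolds]
  rcases eq_or_ne (PySem.List.pyGetD e 1 0) p with h1 | h1 <;>
  rcases eq_or_ne (PySem.List.pyGetD e 2 0) p with h2 | h2 <;>
  rcases eq_or_ne (PySem.List.pyGetD e 2 0) (PySem.List.pyGetD e 1 0) with h3 | h3 <;>
    simp_all [List.count_nil]

lemma pv_count_points (l : List (List Int)) (p : Int) : ∀ init : List Int,
    (l.foldl (fun acc e => acc ++ pvLeaves e) init).count p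
      = init.count p + l.countP (fun e => pvHolds e p) := by
  induction l with
  | nil => simp
  | cons e t ih =>
      intro init
      simp only [List.foldl_cons, List.countP_cons, ih, List.count_append, pv_count_leaves]
      split_ifs <;> simp_all <;> omega

lemma pv_conn_eq (e e2 : List Int) :
    pv_check_connectivity e e2
      = (pvHolds e2 (PySem.List.pyGetD e 1 0) || pvHolds e2 (PySem.List.pyGetD e 2 0)) := by
  simp only [pv_check_connectivity, pvHolds]
  apply Bool.eq_iff_iff.mpr
  simp only [List.contains_cons, List.contains_nil, Bool.or_false, Bool.or_eq_true, beq_iff_eq]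
  constructor <;> intro h <;> omega

lemma pv_insert_eraseIdx (cp : List (List Int)) (i : Nat) (h : i < cp.length) :
    PySem.List.insert (cp.eraseIdx i) (i : Int) cp[i] = cp := by
  have hlen : (cp.eraseIdx i).length = cp.length - 1 := by
    simp [List.length_eraseIdx, h]
  simp only [PySem.List.insert, PySem.List.sliceIndices]
  norm_num
  rw [if_neg (by omega : ¬ ((i:Int) < 0))]
  have hmin : (min ((i:Int)) (((cp.eraseIdx i).length : Int))).toNat = i := by omega
  rw [hmin]
  simp only [List.eraseIdx_eq_take_drop_succ]
  rw [List.take_left' (by simp; omega), List.drop_left' (by simp; omega)]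
  rw [← List.drop_eq_getElem_cons h, List.take_append_drop]

lemma pv_enum_filter_pos (xs : List (List Int)) (f : List Int → Bool) :
    (0 < ((PySem.List.enumerate xs).filter (fun p => f p.2)).length) ↔ xs.any f = true := by
  rw [List.length_pos_iff]
  constructor
  · intro hne
    obtain ⟨p, hp⟩ := List.exists_mem_of_ne_nil _ hne
    have hf := List.of_mem_filter hp
    have hmem : p.2 ∈ xs := by
      rw [← PySem.List.map_snd_enumerate xs 0]
      exact List.mem_map_of_mem (List.mem_of_mem_filter hp)
    exact List.any_eq_true.mpr ⟨p.2, hmem, hf⟩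
  · intro hany
    obtain ⟨x, hx, hfx⟩ := List.any_eq_true.mp hany
    have hx' : x ∈ (PySem.List.enumerate xs).map (·.2) := by
      rw [PySem.List.map_snd_enumerate xs 0]; exact hx
    obtain ⟨p, hp, hpx⟩ := List.mem_map.mp hx'
    intro hnil
    have : p ∈ (PySem.List.enumerate xs).filter (fun p => f p.2) :=
      List.mem_filter.mpr ⟨hp, by rw [hpx]; exact hfx⟩
    simp [hnil] at this

-- A's per-step condition (some other element connects to cp[i]) equals the holder-count condition
lemma pv_cond_eq (cp : List (List Int)) (i : Nat) (h : i < cp.length) :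
    ((cp.eraseIdx i).any (fun e2 => pv_check_connectivity cp[i] e2) = true)
      ↔ (2 ≤ cp.countP (fun e => pvHolds e (PySem.List.pyGetD cp[i] 1 0))
          ∨ 2 ≤ cp.countP (fun e => pvHolds e (PySem.List.pyGetD cp[i] 2 0))) := by
  have hsplit : ∀ p : Int, pvHolds cp[i] p = true →
      cp.countP (fun e => pvHolds e p) = (cp.eraseIdx i).countP (fun e => pvHolds e p) + 1 := by
    intro p hp
    rw [List.eraseIdx_eq_take_drop_succ, List.countP_append]
    conv_lhs => rw [← List.take_append_drop i cp]
    rw [List.countP_append, List.drop_eq_getElem_cons h, List.countP_cons, hp]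
    simp
    omega
  have ha : pvHolds cp[i] (PySem.List.pyGetD cp[i] 1 0) = true := by simp [pvHolds]
  have hb : pvHolds cp[i] (PySem.List.pyGetD cp[i] 2 0) = true := by simp [pvHolds]
  rw [hsplit _ ha, hsplit _ hb]
  simp only [List.any_eq_true, pv_conn_eq, Bool.or_eq_true]
  constructor
  · rintro ⟨e2, hm, hc | hc⟩
    · left
      have hx : 0 < (cp.eraseIdx i).countP
          (fun e => pvHolds e (PySem.List.pyGetD cp[i] 1 0)) :=
        List.countP_pos_iff.mpr ⟨e2, hm, hc⟩
      omega
    · right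
      have hx : 0 < (cp.eraseIdx i).countP
          (fun e => pvHolds e (PySem.List.pyGetD cp[i] 2 0)) :=
        List.countP_pos_iff.mpr ⟨e2, hm, hc⟩
      omega
  · rintro (hc | hc)
    · have hx : 0 < (cp.eraseIdx i).countP
          (fun e => pvHolds e (PySem.List.pyGetD cp[i] 1 0)) := by omega
      obtain ⟨e2, hm, hy⟩ := List.countP_pos_iff.mp hx
      exact ⟨e2, hm, Or.inl hy⟩
    · have hx : 0 < (cp.eraseIdx i).countP
          (fun e => pvHolds e (PySem.List.pyGetD cp[i] 2 0)) := by omega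
      obtain ⟨e2, hm, hy⟩ := List.countP_pos_iff.mp hx
      exact ⟨e2, hm, Or.inr hy⟩

-- the dict built by B's counting loop reads back as a countP over cp
lemma pv_getD_holders (cp : List (List Int)) (p : Int) :
    (((cp.foldl (fun acc e => acc ++ pvLeaves e) []).foldl
        (fun d q => d.insert q (d.getD q 0 + 1)) PySem.Dict.empty).getD p 0)
      = ((cp.countP (fun e => pvHolds e p) : Nat) : Int) := by
  rw [PySem.Dict.getD_foldl_insert_add_one, PySem.Dict.getD_empty, pv_count_points cp p []]
  simp

-- the two loops agree step by step (holders abstract, pinned by hget)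
lemma pv_loop_eq (cp : List (List Int)) (holders : PySem.Dict Int Int)
    (hget : ∀ p : Int, holders.getD p 0 = ((cp.countP (fun e => pvHolds e p) : Nat) : Int)) :
    ∀ (k i : Nat), cp.length = i + k →
      pvSeedLoopA cp i k = pvFindLoop holders (cp.drop i) i := by
  intro k
  induction k with
  | zero =>
      intro i hi
      have hd : cp.drop i = [] := by rw [List.drop_eq_nil_iff]; omega
      simp [pvSeedLoopA, pvFindLoop, hd]
  | succ k ih =>
      intro i hi
      have h : i < cp.length := by omega
      rw [List.drop_eq_getElem_cons h]
      simp only [pvSeedLoopA, pvFindLoop, if_pos h, PySem.List.pop?_natCast cp i h]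
      have hcond : (0 < ((PySem.List.enumerate (cp.eraseIdx i)).filter
            (fun p => pv_check_connectivity cp[i] p.2)).length)
          ↔ (2 ≤ holders.getD (PySem.List.pyGetD cp[i] 1 0) 0
              ∨ 2 ≤ holders.getD (PySem.List.pyGetD cp[i] 2 0) 0) := by
        rw [pv_enum_filter_pos, pv_cond_eq cp i h, hget, hget]
        constructor <;> rintro (hc | hc) <;> [left; right; left; right] <;> omega
      by_cases hB : (2 ≤ holders.getD (PySem.List.pyGetD cp[i] 1 0) 0
          ∨ 2 ≤ holders.getD (PySem.List.pyGetD cp[i] 2 0) 0)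
      · rw [if_pos (hcond.mpr hB), if_pos hB]
      · rw [if_neg (fun hx => hB (hcond.mp hx)), if_neg hB]
        rw [pv_insert_eraseIdx cp i h]
        exact ih (i+1) (by omega)

-- ===== VERDICT (by name: the statement is the Claim_ definition above) =====
theorem seed_index_having_neighbors_py_spec : Claim_equal_seed_index_having_neighbors_py := by
  intro cp _ _
  unfold Spec_seed_index_having_neighbors_py seed_index_having_neighbors_py seed_index_having_neighbors_py_alt
  simpa using pv_loop_eq cp _ (fun p => pv_getD_holders cp p) cp.length 0 (by omega)
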